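-- pv_equiv track=rewrite | github.com/Umesh-Choudhari/ExposedBuildingToSunlight | ExposedBuildingWalls/Exposed_Sunlight.py | maxPointOfBuilding
-- ===== SOURCE A (Python) =====
-- def maxPointOfBuilding(building):
--     maxPoint = None
--     maxX = float("-inf")
--     for vertex in building:
--         if vertex[0] >= maxX:
--             maxX = vertex[0]
--             maxPoint = vertex
--
--     return maxPoint
-- ===== SOURCE B (Python) =====
-- def maxPointOfBuilding(building):
--     if not building:
--         return None
--     s = sorted(building, key=lambda v: v[0])
--     return s[-1]
-- ===== Notes on version B (the rewrite author's own statement) =====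
-- stated objective: alternative
-- what changed: Replaces the linear max-scan with an explicit empty-case guard plus a stable sort by x-coordinate followed by taking the last element, which returns the last vertex with maximal x exactly as A's '>=' rule does.
import Mathlib
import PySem

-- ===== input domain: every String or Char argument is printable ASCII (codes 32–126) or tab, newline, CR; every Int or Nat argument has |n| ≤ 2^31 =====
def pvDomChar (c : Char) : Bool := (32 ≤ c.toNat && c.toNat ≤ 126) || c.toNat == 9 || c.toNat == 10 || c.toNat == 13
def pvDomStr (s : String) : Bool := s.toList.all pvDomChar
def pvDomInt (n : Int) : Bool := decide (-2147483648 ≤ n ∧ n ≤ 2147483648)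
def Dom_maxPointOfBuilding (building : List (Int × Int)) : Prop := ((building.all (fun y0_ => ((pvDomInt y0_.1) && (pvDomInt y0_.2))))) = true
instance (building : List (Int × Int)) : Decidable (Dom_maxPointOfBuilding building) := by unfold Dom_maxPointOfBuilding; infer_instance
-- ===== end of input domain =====

-- B replaces A's linear '>='-max scan with an empty guard plus a stable sort by x and taking
-- the last element (same value on every input; an alternative decomposition, not faster).

-- ===== PORT A =====
-- A's loop carries maxPoint (initially None) and maxX (initially -inf, afterwards always an
-- Int); the float '-inf' start is modelled by the 'none' case, in which 'vertex[0] >= maxX'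
-- is always true.
def maxPointOfBuilding (building : List (Int × Int)) : Option (Int × Int) :=
  (building.foldl
    (fun st v =>
      match st.2 with
      | none => (some v, some v.1)
      | some m => if m ≤ v.1 then (some v, some v.1) else st)
    ((none : Option (Int × Int)), (none : Option Int))).1

-- ===== PORT B =====
def maxPointOfBuilding_alt (building : List (Int × Int)) : Option (Int × Int) :=
  if building = [] then none
  else PySem.List.pyGet? (PySem.List.sorted building (fun v => v.1) false) (-1)

-- ===== PRECONDITION & SPEC =====
def Spec_maxPointOfBuilding (building : List (Int × Int)) (out : Option (Int × Int)) : Prop := out = maxPointOfBuilding_alt building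
instance (building : List (Int × Int)) (out : Option (Int × Int)) : Decidable (Spec_maxPointOfBuilding building out) := by unfold Spec_maxPointOfBuilding; infer_instance

-- ===== CLAIM (what is proved, stated in full; the proofs are below) =====
def Claim_equal_maxPointOfBuilding : Prop := ∀ (building : List (Int × Int)), Dom_maxPointOfBuilding building → Spec_maxPointOfBuilding building (maxPointOfBuilding building)

-- ===== LEMMAS AND PROOFS =====

-- The step function of A's fold, named for the lemmas.
def pvStep (st : Option (Int × Int) × Option Int) (v : Int × Int) : Option (Int × Int) × Option Int :=
  match st.2 with
  | none => (some v, some v.1)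
  | some m => if m ≤ v.1 then (some v, some v.1) else st

-- Inserting an element that compares below the last element leaves the last element in place.
lemma getLast?_insertBy_of_before_last (v : Int × Int) :
    ∀ (ys : List (Int × Int)) (p : Int × Int), ys.getLast? = some p → v.1 < p.1 →
      (PySem.List.insertBy (fun a b => decide ((a : Int × Int).1 < b.1)) v ys).getLast? = some p := by
  intro ys
  induction ys with
  | nil => intro p hp; simp at hp
  | cons y t ih =>
    intro p hp hlt
    simp only [PySem.List.insertBy]
    by_cases hb : v.1 < y.1
    · simp [hb]
      cases t with
      | nil => simp at hp; simp [hp]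
      | cons a b => simpa using hp
    · simp [hb]
      cases ht : t with
      | nil =>
        subst ht
        simp at hp
        subst hp
        exact absurd hlt hb
      | cons a b =>
        rw [ht] at hp ih
        have := ih p (by simpa using hp) hlt
        cases h2 : PySem.List.insertBy (fun a b => decide ((a : Int × Int).1 < b.1)) v (a :: b) with
        | nil =>
          have hv : v ∈ (PySem.List.insertBy (fun x y => decide ((x : Int × Int).1 < y.1)) v (a :: b)) :=
            (PySem.List.mem_insertBy (before := fun x y => decide ((x : Int × Int).1 < y.1))
              (x := v) (ys := a :: b) (y := v)).mpr (Or.inl rfl)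
          rw [h2] at hv; simp at hv
        | cons c d =>
          rw [h2] at this
          rw [List.getLast?_cons_cons]
          exact this

-- A's fold computes (last of the stable sort by x, its x-coordinate).
lemma foldl_step_eq_sorted_getLast (building : List (Int × Int)) :
    building.foldl pvStep ((none : Option (Int × Int)), (none : Option Int))
      = ((PySem.List.sorted building (fun v => v.1) false).getLast?,
         ((PySem.List.sorted building (fun v => v.1) false).getLast?).map (·.1)) := by
  induction building using List.reverseRecOn with
  | nil => simp [PySem.List.sorted]
  | append_singleton xs v ih =>
    have hs : ∀ (l : List (Int × Int)), PySem.List.sorted l (fun v => (v : Int × Int).1) false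
        = l.foldl (fun acc x => PySem.List.insertBy (fun a b => decide ((a : Int × Int).1 < b.1)) x acc) [] :=
      fun l => PySem.List.sorted_eq_foldl_insertBy l (fun v => v.1)
    have hstep : PySem.List.sorted (xs ++ [v]) (fun v => (v : Int × Int).1) false
        = PySem.List.insertBy (fun a b => decide ((a : Int × Int).1 < b.1)) v
            (PySem.List.sorted xs (fun v => v.1) false) := by
      rw [hs, hs, List.foldl_append, List.foldl_cons, List.foldl_nil]
    rw [List.foldl_append, List.foldl_cons, List.foldl_nil, ih, hstep]
    cases hlast : (PySem.List.sorted xs (fun v => (v : Int × Int).1) false).getLast? with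
    | none =>
      -- sorted xs is empty
      have hnil : PySem.List.sorted xs (fun v => (v : Int × Int).1) false = [] := by
        cases h : PySem.List.sorted xs (fun v => (v : Int × Int).1) false with
        | nil => rfl
        | cons a b => rw [h] at hlast; simp [List.getLast?_cons] at hlast
      simp [pvStep, hnil, PySem.List.insertBy]
    | some p =>
      by_cases hle : p.1 ≤ v.1
      · -- every element of sorted xs has key ≤ p.1 ≤ v.1, so v is appended at the end
        have hpw := PySem.List.sorted_pairwise xs (fun v => (v : Int × Int).1)
        have hins : PySem.List.insertBy (fun a b => decide ((a : Int × Int).1 < b.1)) v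
            (PySem.List.sorted xs (fun v => v.1) false)
            = (PySem.List.sorted xs (fun v => v.1) false) ++ [v] := by
          apply PySem.List.insertBy_of_forall_not_before
          intro y hy
          -- y precedes-or-equals the last element p, hence y.1 ≤ p.1 ≤ v.1
          have hyp : y.1 ≤ p.1 := by
            rcases List.getLast?_eq_some_iff.mp hlast with ⟨l', hl'⟩
            rw [hl'] at hy hpw
            rcases List.mem_append.mp hy with h1 | h1
            · exact (List.pairwise_append.mp hpw).2.2 y h1 p (by simp)
            · simp at h1; rw [h1]
          simp [not_lt.mpr (hyp.trans hle)]
        simp [pvStep, hle, hins]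
      · rw [not_le] at hle
        have hins := getLast?_insertBy_of_before_last v _ p hlast hle
        simp [pvStep, not_le.mpr hle, hins]

-- s[-1] of a nonempty list is its last element.
lemma pyGet?_neg_one_eq_getLast? (s : List (Int × Int)) (h : s ≠ []) :
    PySem.List.pyGet? s (-1) = s.getLast? := by
  have hlen : 1 ≤ s.length := List.length_pos_iff.mpr h
  simp only [PySem.List.pyGet?, PySem.List.pyIdx?]
  have h1 : ¬ (0 : Int) ≤ -1 := by norm_num
  have h2 : (-(s.length : Int)) ≤ -1 := by omega
  rw [if_neg h1, if_pos h2]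
  simp only [Option.bind_some, List.getLast?_eq_getElem?]
  norm_num

-- ===== VERDICT (by name: the statement is the Claim_ definition above) =====
theorem maxPointOfBuilding_spec : Claim_equal_maxPointOfBuilding := by
  intro building _
  unfold Spec_maxPointOfBuilding maxPointOfBuilding maxPointOfBuilding_alt
  by_cases hb : building = []
  · simp [hb]
  · rw [if_neg hb]
    have hsnil : PySem.List.sorted building (fun v => (v : Int × Int).1) false ≠ [] := by
      intro h; exact hb ((PySem.List.sorted_eq_nil_iff building (fun v => v.1) false).mp h)
    rw [pyGet?_neg_one_eq_getLast? _ hsnil]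
    have := foldl_step_eq_sorted_getLast building
    calc (building.foldl (fun st v =>
            match st.2 with
            | none => (some v, some v.1)
            | some m => if m ≤ v.1 then (some v, some v.1) else st)
            ((none : Option (Int × Int)), (none : Option Int))).1
        = (building.foldl pvStep ((none : Option (Int × Int)), (none : Option Int))).1 := rfl
      _ = (PySem.List.sorted building (fun v => v.1) false).getLast? := by rw [this]
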